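-- pv_equiv track=rewrite | github.com/dff652/ts-iteration-loop | services/inference/wavelet.py | split_continuous_outliers
-- ===== SOURCE A (Python) =====
-- def split_continuous_outliers(outlier_indices, min_size=1,gp=1):
--     split_indices = []
--     current_split = []
--
--     for i in range(len(outlier_indices)):
--         if not current_split or outlier_indices[i] == current_split[-1] + gp:
--             current_split.append(outlier_indices[i])
--         else:
--             if len(current_split) >= min_size:
--                 split_indices.append(current_split)
--             current_split = [outlier_indices[i]]
--
--     if len(current_split) >= min_size:
--         split_indices.append(current_split)
--
--     return split_indices
-- ===== SOURCE B (Python) =====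
-- def split_continuous_outliers(outlier_indices, min_size=1, gp=1):
--     xs = list(outlier_indices)
--     n = len(xs)
--     boundaries = [0] + [i for i, (prev, cur) in enumerate(zip(xs, xs[1:]), 1)
--                         if cur != prev + gp] + [n]
--     return [xs[a:b] for a, b in zip(boundaries, boundaries[1:])
--             if b - a >= min_size]
-- ===== Notes on version B (the rewrite author's own statement) =====
-- stated objective: alternative
-- what changed: A builds the runs incrementally with a stateful accumulator (current_split) inside one index loop; B first computes the run boundary positions from adjacent pairs and then materialises each run as a slice between consecutive boundaries, filtering by length arithmetic instead of accumulator size.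
import Mathlib
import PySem

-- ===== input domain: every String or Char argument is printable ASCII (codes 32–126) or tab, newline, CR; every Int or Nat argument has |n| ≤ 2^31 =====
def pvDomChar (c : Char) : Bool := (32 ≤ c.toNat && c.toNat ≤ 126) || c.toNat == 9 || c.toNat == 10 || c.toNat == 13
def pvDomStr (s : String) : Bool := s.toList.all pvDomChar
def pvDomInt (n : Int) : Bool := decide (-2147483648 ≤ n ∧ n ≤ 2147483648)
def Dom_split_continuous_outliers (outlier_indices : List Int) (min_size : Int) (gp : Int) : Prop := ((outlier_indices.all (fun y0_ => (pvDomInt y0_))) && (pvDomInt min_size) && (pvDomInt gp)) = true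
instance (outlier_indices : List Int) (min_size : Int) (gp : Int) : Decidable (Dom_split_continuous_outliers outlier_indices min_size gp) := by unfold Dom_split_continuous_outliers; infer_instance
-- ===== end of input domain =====

-- B replaces A's stateful accumulator loop by computing run boundary positions first and slicing between consecutive boundaries (alternative decomposition, same asymptotic cost).

-- ===== PORT A =====
-- the body of A's loop, applied to v = outlier_indices[i]
def pvStepA (min_size gp : Int) (acc : List (List Int) × List Int) (v : Int) :
    List (List Int) × List Int :=
  if acc.2 = [] ∨ v = acc.2.getLastD 0 + gp then
    (acc.1, acc.2 ++ [v])
  else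
    ((if min_size ≤ (acc.2.length : Int) then acc.1 ++ [acc.2] else acc.1), [v])

def split_continuous_outliers (outlier_indices : List Int) (min_size : Int) (gp : Int) : List (List Int) :=
  let st := (PySem.List.pyRange 0 (outlier_indices.length : Int) 1).foldl
      (fun acc i => pvStepA min_size gp acc (PySem.List.pyGetD outlier_indices i 0)) ([], [])
  if min_size ≤ (st.2.length : Int) then st.1 ++ [st.2] else st.1

-- ===== PORT B =====
def split_continuous_outliers_alt (outlier_indices : List Int) (min_size : Int) (gp : Int) : List (List Int) :=
  let n : Int := outlier_indices.length
  let bnds : List Int := [0] ++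
    ((PySem.List.enumerate (outlier_indices.zip outlier_indices.tail) 1).filter
        (fun p => decide (p.2.2 ≠ p.2.1 + gp))).map (fun p => p.1) ++ [n]
  ((bnds.zip bnds.tail).filter (fun p => decide (min_size ≤ p.2 - p.1))).map
    (fun p => PySem.List.slice outlier_indices (some p.1) (some p.2))

-- ===== PRECONDITION & SPEC =====
def Spec_split_continuous_outliers (outlier_indices : List Int) (min_size : Int) (gp : Int) (out : List (List Int)) : Prop := out = split_continuous_outliers_alt outlier_indices min_size gp
instance (outlier_indices : List Int) (min_size : Int) (gp : Int) (out : List (List Int)) : Decidable (Spec_split_continuous_outliers outlier_indices min_size gp out) := by unfold Spec_split_continuous_outliers; infer_instance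

-- ===== CLAIM (what is proved, stated in full; the proofs are below) =====
def Claim_equal_split_continuous_outliers : Prop := ∀ (outlier_indices : List Int) (min_size : Int) (gp : Int), Dom_split_continuous_outliers outlier_indices min_size gp → Spec_split_continuous_outliers outlier_indices min_size gp (split_continuous_outliers outlier_indices min_size gp)

-- ===== LEMMAS AND PROOFS =====

-- canonical run decomposition (proof-side): runsAux gp cur ys extends the nonempty run cur
def runsAux (gp : Int) (cur : List Int) : List Int → List (List Int)
  | [] => [cur]
  | y :: ys => if y = cur.getLastD 0 + gp then runsAux gp (cur ++ [y]) ys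
               else cur :: runsAux gp [y] ys

def keep (min_size : Int) (rs : List (List Int)) : List (List Int) :=
  rs.filter (fun r => decide (min_size ≤ (r.length : Int)))

def finish (min_size : Int) (st : List (List Int) × List Int) : List (List Int) :=
  if min_size ≤ (st.2.length : Int) then st.1 ++ [st.2] else st.1

-- boundary positions (proof-side, Nat counter cast to Int)
def brksI (gp : Int) (k : Nat) (prev : Int) : List Int → List Int
  | [] => []
  | y :: ys => (if y ≠ prev + gp then [(k : Int)] else []) ++ brksI gp (k + 1) y ys

def outI (full : List Int) (min_size : Int) (bs : List Int) : List (List Int) :=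
  ((bs.zip bs.tail).filter (fun p => decide (min_size ≤ p.2 - p.1))).map
    (fun p => PySem.List.slice full (some p.1) (some p.2))

-- A's fold equals the filtered run decomposition
lemma foldA_eq (ms gp : Int) :
    ∀ (ys : List Int) (splits : List (List Int)) (cur : List Int), cur ≠ [] →
      finish ms (ys.foldl (pvStepA ms gp) (splits, cur)) = splits ++ keep ms (runsAux gp cur ys) := by
  intro ys
  induction ys with
  | nil =>
      intro splits cur h
      simp only [List.foldl_nil, finish, runsAux, keep, List.filter]
      split_ifs with hc
      · simp [hc]
      · simp [hc]
  | cons y ys ih =>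
      intro splits cur h
      by_cases hg : y = cur.getLastD 0 + gp
      · have hstep : pvStepA ms gp (splits, cur) y = (splits, cur ++ [y]) := by
          simp [pvStepA, hg]
        rw [List.foldl_cons, hstep, ih splits (cur ++ [y]) (by simp),
          runsAux, if_pos hg]
      · have hstep : pvStepA ms gp (splits, cur) y =
            ((if ms ≤ (cur.length : Int) then splits ++ [cur] else splits), [y]) := by
          simp only [pvStepA]
          rw [if_neg (by simp only [not_or]; exact ⟨h, by simpa using hg⟩)]
        rw [List.foldl_cons, hstep, ih _ [y] (by simp), runsAux, if_neg hg]
        simp only [keep, List.filter]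
        split_ifs with hc
        · simp [hc, List.append_assoc]
        · simp [hc]

-- B's boundary list equals brksI
lemma enum_eq_brks (gp : Int) :
    ∀ (ys : List Int) (prev : Int) (k : Nat),
      ((PySem.List.enumerate ((prev :: ys).zip ys) (k : Int)).filter
          (fun p => decide (p.2.2 ≠ p.2.1 + gp))).map (fun p => p.1) = brksI gp k prev ys := by
  intro ys
  induction ys with
  | nil => intro prev k; simp [brksI, PySem.List.enumerate_nil]
  | cons y ys ih =>
      intro prev k
      have hcast : ((k : Int) + 1) = ((k + 1 : Nat) : Int) := by push_cast; ring
      rw [List.zip_cons_cons, PySem.List.enumerate_cons, hcast, List.filter_cons]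
      simp only [brksI]
      by_cases hy : y = prev + gp
      · rw [if_neg (by simp [hy]), ih y (k + 1), if_neg (by simp [hy])]
        simp
      · rw [if_pos (by simp [hy]), List.map_cons, ih y (k + 1), if_pos hy]
        simp

-- last element of a (m+1)-prefix
lemma getLastD_take_succ : ∀ (u : List Int) (m : Nat) (y d : Int), u[m]? = some y →
    (u.take (m + 1)).getLastD d = y := by
  intro u
  induction u with
  | nil => intro m y d h; simp at h
  | cons c u ih =>
      intro m y d h
      cases m with
      | zero => simp at h; simp [h]
      | succ m =>
          simp only [List.getElem?_cons_succ] at h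
          rw [List.take_succ_cons, List.getLastD_cons]
          exact ih m y c h

-- peeling one pair off the boundary pipeline
lemma outI_cons (full : List Int) (ms b0 b1 : Int) (t : List Int) :
    outI full ms (b0 :: b1 :: t) =
      (if ms ≤ b1 - b0 then [PySem.List.slice full (some b0) (some b1)] else []) ++
        outI full ms (b1 :: t) := by
  simp only [outI, List.tail_cons, List.zip_cons_cons, List.filter_cons]
  by_cases hc : ms ≤ b1 - b0
  · simp [hc]
  · simp [hc]

-- slicing a natCast window is drop/take
lemma slice_window (full : List Int) (a b : Nat) :
    PySem.List.slice full (some (a : Int)) (some (b : Int)) = (full.drop a).take (b - a) := by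
  rw [PySem.List.slice_toNat full (Int.natCast_nonneg a) (Int.natCast_nonneg b)]
  simp

-- the core correspondence between boundary slicing and the run decomposition
lemma core (ms gp : Int) :
    ∀ (ys full : List Int) (a k : Nat) (x : Int), a ≤ k → full.drop k = x :: ys →
      outI full ms ((a : Int) :: (brksI gp (k + 1) x ys ++ [(full.length : Int)])) =
        keep ms (runsAux gp ((full.drop a).take (k + 1 - a)) ys) := by
  intro ys
  induction ys with
  | nil =>
      intro full a k x hak h
      have h1 := congrArg List.length h
      simp only [List.length_drop, List.length_cons, List.length_nil] at h1
      have hlen : full.length = k + 1 := by omega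
      have hcl : ((full.drop a).take (k + 1 - a)).length = k + 1 - a := by
        simp only [List.length_take, List.length_drop, hlen]
        omega
      simp only [brksI, List.nil_append, outI, List.tail_cons, List.zip_cons_cons,
        List.zip_nil_right, List.filter_cons, List.filter_nil, keep, runsAux]
      rw [hlen]
      have hw := slice_window full a (k + 1)
      by_cases hcnd : ms ≤ (((k + 1 : Nat)) : Int) - (a : Int)
      · have hc2 : ms ≤ (((full.drop a).take (k + 1 - a)).length : Int) := by
          rw [hcl, Int.natCast_sub (by omega)]; push_cast at hcnd ⊢; omega
        rw [if_pos (by simpa using hcnd), if_pos (by simpa using hc2),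
          List.map_cons, List.map_nil, hw]
      · have hc2 : ¬ ms ≤ (((full.drop a).take (k + 1 - a)).length : Int) := by
          rw [hcl, Int.natCast_sub (by omega)]; push_cast at hcnd ⊢; omega
        rw [if_neg (by simpa using hcnd), if_neg (by simpa using hc2)]
        simp
  | cons y ys ih =>
      intro full a k x hak h
      have h2 : full.drop (k + 1) = y :: ys := by
        have hd : (full.drop k).drop 1 = y :: ys := by rw [h]; rfl
        rw [List.drop_drop] at hd
        exact hd
      have hxk : full[k]? = some x := by
        have h0 : (full.drop k)[0]? = full[k + 0]? := List.getElem?_drop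
        rw [h] at h0
        simpa using h0.symm
      have hyk : full[k + 1]? = some y := by
        have h0 : (full.drop (k + 1))[0]? = full[k + 1 + 0]? := List.getElem?_drop
        rw [h2] at h0
        simpa using h0.symm
      have hlast : ((full.drop a).take (k + 1 - a)).getLastD 0 = x := by
        have hu : (full.drop a)[k - a]? = some x := by
          have h0 : (full.drop a)[k - a]? = full[a + (k - a)]? := List.getElem?_drop
          rw [show a + (k - a) = k by omega] at h0
          rw [h0]; exact hxk
        rw [show k + 1 - a = (k - a) + 1 by omega]
        exact getLastD_take_succ _ _ _ _ hu
      have h1 := congrArg List.length h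
      simp only [List.length_drop, List.length_cons] at h1
      have hklen : k + 1 < full.length := by omega
      by_cases hy : y = x + gp
      · have hb : brksI gp (k + 1) x (y :: ys) = brksI gp (k + 1 + 1) y ys := by
          simp [brksI, hy]
        rw [hb, ih full a (k + 1) y (by omega) h2]
        have hext : (full.drop a).take (k + 1 + 1 - a) = (full.drop a).take (k + 1 - a) ++ [y] := by
          have hu : (full.drop a)[k + 1 - a]? = some y := by
            have h0 : (full.drop a)[k + 1 - a]? = full[a + (k + 1 - a)]? := List.getElem?_drop
            rw [show a + (k + 1 - a) = k + 1 by omega] at h0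
            rw [h0]; exact hyk
          rw [show k + 1 + 1 - a = (k + 1 - a) + 1 by omega, List.take_add_one, hu]
          rfl
        rw [hext]
        have : runsAux gp ((full.drop a).take (k + 1 - a)) (y :: ys) =
            runsAux gp ((full.drop a).take (k + 1 - a) ++ [y]) ys := by
          rw [runsAux, if_pos (by rw [hlast]; exact hy)]
        rw [this]
      · have hb : brksI gp (k + 1) x (y :: ys) =
            ((k + 1 : Nat) : Int) :: brksI gp (k + 1 + 1) y ys := by
          simp [brksI, hy]
        rw [hb, List.cons_append, outI_cons,
          ih full (k + 1) (k + 1) y (le_refl _) h2]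
        have hone : (full.drop (k + 1)).take (k + 1 + 1 - (k + 1)) = [y] := by
          rw [show k + 1 + 1 - (k + 1) = 1 by omega, h2]; rfl
        rw [hone]
        have hrn : runsAux gp ((full.drop a).take (k + 1 - a)) (y :: ys) =
            (full.drop a).take (k + 1 - a) :: runsAux gp [y] ys := by
          rw [runsAux, if_neg (by rw [hlast]; exact hy)]
        rw [hrn]
        have hsl : PySem.List.slice full (some (a : Int)) (some ((k + 1 : Nat) : Int)) =
            (full.drop a).take (k + 1 - a) := slice_window full a (k + 1)
        have hcl : ((full.drop a).take (k + 1 - a)).length = k + 1 - a := by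
          simp [List.length_take, List.length_drop]
          omega
        have hiff : (ms ≤ (((k + 1 : Nat)) : Int) - (a : Int)) ↔
            (ms ≤ (((full.drop a).take (k + 1 - a)).length : Int)) := by
          rw [hcl, Int.natCast_sub (by omega)]
        by_cases hc : ms ≤ (((k + 1 : Nat)) : Int) - (a : Int)
        · rw [if_pos hc]
          simp only [keep, List.filter_cons]
          rw [if_pos (by simpa using hiff.mp hc), hsl]
          simp
        · rw [if_neg hc]
          simp only [keep, List.filter_cons]
          rw [if_neg (by simp only [decide_eq_true_eq]; exact fun hh => hc (hiff.mpr hh))]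
          simp

-- ===== VERDICT (by name: the statement is the Claim_ definition above) =====
theorem split_continuous_outliers_spec : Claim_equal_split_continuous_outliers := by
  intro xs ms gp _
  unfold Spec_split_continuous_outliers
  have hA : split_continuous_outliers xs ms gp =
      finish ms (xs.foldl (pvStepA ms gp) ([], [])) := by
    unfold split_continuous_outliers finish
    rw [PySem.List.foldl_pyRange_zero_pyGetD' xs 0 (pvStepA ms gp) ([], [])]
  cases xs with
  | nil =>
      rw [hA]
      unfold split_continuous_outliers_alt
      by_cases hms : ms ≤ (0 : Int)
      · simp [finish, PySem.List.enumerate_nil, PySem.List.slice, hms]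
      · simp [finish, PySem.List.enumerate_nil, hms]
  | cons x ys =>
      have hfirst : pvStepA ms gp ([], []) x = ([], [x]) := by simp [pvStepA]
      rw [hA, List.foldl_cons, hfirst, foldA_eq ms gp ys [] [x] (by simp),
        List.nil_append]
      have hB : split_continuous_outliers_alt (x :: ys) ms gp =
          outI (x :: ys) ms (((0 : Nat) : Int) ::
            (brksI gp 1 x ys ++ [(((x :: ys).length : Nat) : Int)])) := by
        unfold split_continuous_outliers_alt outI
        rw [show ((1 : Int)) = ((1 : Nat) : Int) by norm_num]
        rw [show (x :: ys).tail = ys from rfl, enum_eq_brks gp ys x 1]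
        norm_num
      rw [hB]
      have hc := core ms gp ys (x :: ys) 0 0 x (le_refl 0) rfl
      norm_num at hc
      norm_num [hc]
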